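-- pv_equiv track=rewrite | github.com/databricks-solutions/caspers-kitchens | utils/resolve_tasks.py | resolve_with_parents
-- ===== SOURCE A (Python) =====
-- from collections import OrderedDict, deque
--
-- def resolve_with_parents(targets, revdeps):
--     """Include all ancestors and return CSV ordered parent→child."""
--     seen = OrderedDict()
--     q = deque(targets)
--     while q:
--         cur = q.popleft()
--         if cur in seen:
--             continue
--         seen[cur] = True
--         for p in revdeps.get(cur, []):
--             q.append(p)
--
--     depth_cache = {}
--     def depth(n):
--         if n in depth_cache:
--             return depth_cache[n]
--         parents = revdeps.get(n, [])
--         d = 0 if not parents else 1 + max(depth(p) for p in parents)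
--         depth_cache[n] = d
--         return d
--
--     ordered = sorted(seen.keys(), key=lambda n: (depth(n), n))
--     return ",".join(ordered)
-- ===== SOURCE B (Python) =====
-- def resolve_with_parents(targets, revdeps):
--     """Include all ancestors and return CSV ordered parent->child."""
--     # Phase 1: ancestor closure by whole-frontier set expansion (no queue, no recursion).
--     closure = set()
--     frontier = set(targets)
--     while frontier:
--         closure |= frontier
--         frontier = {p for n in frontier for p in revdeps.get(n, [])} - closure
--     # Phase 2: depths by iterative longest-path relaxation (Bellman-Ford style);
--     # len(revdeps) rounds always suffice (a longest parent chain steps only through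
--     # revdeps keys), and we stop as soon as a full pass changes nothing.
--     nodes = sorted(closure)
--     depth = dict.fromkeys(nodes, 0)
--     for _ in range(len(revdeps)):
--         changed = False
--         for n in nodes:
--             ps = revdeps.get(n, [])
--             if ps:
--                 d = 1 + max(depth[p] for p in ps)
--                 if d != depth[n]:
--                     depth[n] = d
--                     changed = True
--         if not changed:
--             break
--     return ",".join(sorted(nodes, key=lambda n: (depth[n], n)))
-- ===== Notes on version B (the rewrite author's own statement) =====
-- stated objective: alternative
-- what changed: B replaces A's deque-BFS plus memoized recursive depth() with a fully iterative design: the ancestor closure is grown by whole-frontier set expansion, and depths are computed by Bellman-Ford-style longest-path relaxation (passes over the nodes until a pass changes nothing, at most len(revdeps) of them) instead of recursion.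
import Mathlib
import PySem

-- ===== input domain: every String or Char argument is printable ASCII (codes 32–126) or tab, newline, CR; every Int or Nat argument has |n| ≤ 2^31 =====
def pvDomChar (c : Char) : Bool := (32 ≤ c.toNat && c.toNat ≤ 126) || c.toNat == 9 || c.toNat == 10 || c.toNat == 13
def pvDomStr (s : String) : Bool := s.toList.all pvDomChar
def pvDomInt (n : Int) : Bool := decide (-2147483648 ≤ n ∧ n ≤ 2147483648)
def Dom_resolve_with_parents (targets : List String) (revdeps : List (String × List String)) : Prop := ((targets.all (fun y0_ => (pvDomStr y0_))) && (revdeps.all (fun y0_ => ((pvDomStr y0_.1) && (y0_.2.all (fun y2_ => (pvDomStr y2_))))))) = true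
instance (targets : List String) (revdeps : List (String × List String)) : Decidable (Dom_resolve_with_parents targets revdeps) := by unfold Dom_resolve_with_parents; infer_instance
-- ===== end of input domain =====

-- B replaces A's deque-BFS + memoized recursive depth() with a fully iterative design:
-- whole-frontier set expansion for the ancestor closure, then Bellman-Ford-style
-- longest-path relaxation for the depths (return value only; neither mutates its input).

-- ===== PORT A =====

-- revdeps.get(n, []) — shared by both ports (both Pythons call it)
def pvParents (revdeps : List (String × List String)) (n : String) : List String :=
  PySem.Dict.getD (PySem.Dict.mk revdeps) n []

-- A's memoized recursive depth(): fuel and the fuel-0 branch are only a totality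
-- device; under Pre_ they are never reached.
mutual
def pvVisit (revdeps : List (String × List String)) :
    Nat → PySem.Dict String Int → String → Int × PySem.Dict String Int
  | 0, c, _ => (0, c)
  | f+1, c, n =>
    match c.get? n with
    | some v => (v, c)
    | none =>
      let ps := pvParents revdeps n
      if ps = [] then (0, c.insert n 0)
      else
        let r := pvVisitList revdeps f c ps
        let d := 1 + (PySem.List.max? r.1 (fun x => x)).getD 0
        (d, r.2.insert n d)
termination_by f _ _ => (f, 0)
def pvVisitList (revdeps : List (String × List String)) :
    Nat → PySem.Dict String Int → List String → List Int × PySem.Dict String Int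
  | _, c, [] => ([], c)
  | f, c, p :: ps =>
    let r := pvVisit revdeps f c p
    let r2 := pvVisitList revdeps f r.2 ps
    (r.1 :: r2.1, r2.2)
termination_by f _ ps => (f, ps.length + 1)
end

-- A's BFS loop over the deque; `univ` and the `cur ∈ univ` test are only a termination
-- device: every queue element is drawn from `univ`, so the third branch is never taken.
def pvBfs (revdeps : List (String × List String)) (univ : List String)
    (seen : PySem.Dict String Bool) (q : List String) : PySem.Dict String Bool :=
  match q with
  | [] => seen
  | cur :: rest =>
    if seen.contains cur then pvBfs revdeps univ seen rest
    else if cur ∈ univ then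
      pvBfs revdeps univ (seen.insert cur true) (rest ++ pvParents revdeps cur)
    else pvBfs revdeps univ (seen.insert cur true) rest
termination_by ((univ.toFinset \ seen.keys.toFinset).card, q.length)
decreasing_by
  · exact Prod.Lex.right _ (Nat.lt_succ_self _)
  · apply Prod.Lex.left
    have hcur : cur ∉ seen.keys := by
      rw [← PySem.Dict.contains_iff_mem_keys]; simp_all
    apply Finset.card_lt_card
    constructor
    · intro x hx
      rw [Finset.mem_sdiff, List.mem_toFinset] at hx ⊢
      refine ⟨hx.1, fun hm => hx.2 ?_⟩
      rw [List.mem_toFinset] at hm ⊢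
      exact (PySem.Dict.mem_keys_insert _ _ _ _).2 (Or.inr hm)
    · intro hsub
      have h1 : cur ∈ univ.toFinset \ seen.keys.toFinset := by
        rw [Finset.mem_sdiff, List.mem_toFinset, List.mem_toFinset]
        exact ⟨by assumption, hcur⟩
      have h2 := hsub h1
      rw [Finset.mem_sdiff, List.mem_toFinset, List.mem_toFinset] at h2
      exact h2.2 ((PySem.Dict.mem_keys_insert _ _ _ _).2 (Or.inl rfl))
  · have hE : univ.toFinset \ (seen.insert cur true).keys.toFinset
        = univ.toFinset \ seen.keys.toFinset := by
      ext x
      simp only [Finset.mem_sdiff, List.mem_toFinset, PySem.Dict.mem_keys_insert]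
      constructor
      · rintro ⟨hx, hk⟩
        exact ⟨hx, fun hm => hk (Or.inr hm)⟩
      · rintro ⟨hx, hk⟩
        refine ⟨hx, fun hm => ?_⟩
        rcases hm with rfl | hm
        · exact absurd hx (by assumption)
        · exact hk hm
    rw [hE]
    exact Prod.Lex.right _ (Nat.lt_succ_self _)

def resolve_with_parents (targets : List String) (revdeps : List (String × List String)) : String :=
  let univ := targets ++ revdeps.map (·.1) ++ revdeps.flatMap (·.2)
  let seen := pvBfs revdeps univ PySem.Dict.empty targets
  let fuel := revdeps.length + 1
  let cache := seen.keys.foldl (fun c n => (pvVisit revdeps fuel c n).2) PySem.Dict.empty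
  PySem.Str.join "," (PySem.List.sorted2 seen.keys (fun n => cache.getD n 0) (fun n => n))

-- ===== PORT B =====

-- B's `while frontier:` loop; `univ` and the frontier-⊆-univ guard are only a
-- termination device: along B's actual calls every frontier element is in `univ`
-- and (by construction of the set difference) outside `closure`.
def pvExpand (revdeps : List (String × List String)) (univ : List String)
    (closure frontier : PySem.Set String) : PySem.Set String :=
  if frontier = [] then closure
  else if h : ∀ x ∈ frontier, x ∈ univ ∧ x ∉ closure then
    pvExpand revdeps univ (PySem.Set.union closure frontier)
      (PySem.Set.diff (PySem.Set.ofList (frontier.flatMap (pvParents revdeps)))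
        (PySem.Set.union closure frontier))
  else closure
termination_by (univ.toFinset \ closure.toFinset).card
decreasing_by
  rename_i hne
  obtain ⟨x, hx⟩ := List.exists_mem_of_ne_nil frontier hne
  obtain ⟨hxu, hxc⟩ := h x hx
  apply Finset.card_lt_card
  constructor
  · intro y hy
    rw [Finset.mem_sdiff, List.mem_toFinset] at hy ⊢
    refine ⟨hy.1, fun hm => hy.2 ?_⟩
    rw [List.mem_toFinset] at hm ⊢
    exact (PySem.Set.mem_union closure frontier y).2 (Or.inl hm)
  · intro hsub
    have h1 : x ∈ univ.toFinset \ closure.toFinset := by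
      rw [Finset.mem_sdiff, List.mem_toFinset, List.mem_toFinset]
      exact ⟨hxu, hxc⟩
    have h2 := hsub h1
    rw [Finset.mem_sdiff, List.mem_toFinset, List.mem_toFinset] at h2
    exact h2.2 ((PySem.Set.mem_union closure frontier x).2 (Or.inr hx))

-- one relaxation step for one node n (the body of B's inner `for n in nodes` loop);
-- the state is (depth dict, changed flag)
def pvStepF (revdeps : List (String × List String))
    (st : PySem.Dict String Int × Bool) (n : String) : PySem.Dict String Int × Bool :=
  let ps := pvParents revdeps n
  if ps = [] then st
  else
    let w := 1 + (PySem.List.max? (ps.map (fun p => st.1.getD p 0)) (fun x => x)).getD 0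
    if w = st.1.getD n 0 then st else (st.1.insert n w, true)

-- one full pass of B's relaxation (`for n in nodes: …` with its `changed` flag);
-- `depth[p]` is total getD 0 here, exact because every parent of a closure node is
-- a closure node, hence a key of the dict.
def pvPassF (revdeps : List (String × List String)) (nodes : List String)
    (d : PySem.Dict String Int) : PySem.Dict String Int × Bool :=
  nodes.foldl (pvStepF revdeps) (d, false)

-- B's outer `for _ in range(len(revdeps)): … if not changed: break` loop
def pvRun (revdeps : List (String × List String)) (nodes : List String) :
    Nat → PySem.Dict String Int → PySem.Dict String Int
  | 0, d => d
  | k+1, d =>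
    let r := pvPassF revdeps nodes d
    if r.2 then pvRun revdeps nodes k r.1 else r.1

def resolve_with_parents_alt (targets : List String) (revdeps : List (String × List String)) : String :=
  let univ := targets ++ revdeps.flatMap (·.2)   -- termination device for pvExpand only
  let closure := pvExpand revdeps univ PySem.Set.empty (PySem.Set.ofList targets)
  let nodes := PySem.List.sorted closure (fun n => n)
  let depth0 := nodes.foldl (fun d n => PySem.Dict.insert d n (0 : Int)) PySem.Dict.empty
  let depth := pvRun revdeps nodes revdeps.length depth0
  PySem.Str.join "," (PySem.List.sorted2 nodes (fun n => depth.getD n 0) (fun n => n))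

-- ===== PRECONDITION & SPEC =====

-- the k-step parent frontier reachable from the targets
def pvFront (revdeps : List (String × List String)) (targets : List String) : Nat → List String
  | 0 => PySem.List.dedup targets
  | k+1 => PySem.List.dedup ((pvFront revdeps targets k).flatMap (pvParents revdeps))

-- Pre_ excludes exactly the inputs whose parent graph has a cycle reachable from the
-- targets (equivalently: some parent chain from a target is longer than |revdeps|);
-- there Python A's recursive depth() never terminates and raises RecursionError.
def Pre_resolve_with_parents (targets : List String) (revdeps : List (String × List String)) : Prop :=
  pvFront revdeps targets (revdeps.length + 1) = []
instance (targets : List String) (revdeps : List (String × List String)) : Decidable (Pre_resolve_with_parents targets revdeps) := by unfold Pre_resolve_with_parents; infer_instance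

def pvWitness_resolve_with_parents : List String × (List (String × List String)) :=
  (["frontend", "api"], [("frontend", ["api", "db"]), ("api", ["db"])])

def Spec_resolve_with_parents (targets : List String) (revdeps : List (String × List String)) (out : String) : Prop := out = resolve_with_parents_alt targets revdeps
instance (targets : List String) (revdeps : List (String × List String)) (out : String) : Decidable (Spec_resolve_with_parents targets revdeps out) := by unfold Spec_resolve_with_parents; infer_instance

-- ===== CLAIM (what is proved, stated in full; the proofs are below) =====
def Claim_equal_resolve_with_parents : Prop := ∀ (targets : List String) (revdeps : List (String × List String)), Dom_resolve_with_parents targets revdeps → Pre_resolve_with_parents targets revdeps → Spec_resolve_with_parents targets revdeps (resolve_with_parents targets revdeps)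

-- ===== LEMMAS AND PROOFS =====

def pvEdge (revdeps : List (String × List String)) (n p : String) : Prop :=
  p ∈ pvParents revdeps n

def pvReach (revdeps : List (String × List String)) : String → String → Prop :=
  Relation.ReflTransGen (pvEdge revdeps)

-- reachable from some target
def pvR (targets : List String) (revdeps : List (String × List String)) (k : String) : Prop :=
  ∃ t ∈ targets, pvReach revdeps t k

-- pure (memo-free) fueled depth: the reference value both implementations compute
mutual
def pvDepth (revdeps : List (String × List String)) : Nat → String → Option Int
  | 0, _ => none
  | f+1, n =>
    let ps := pvParents revdeps n
    if ps = [] then some 0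
    else (pvDepthList revdeps f ps).map (fun vs => 1 + (PySem.List.max? vs (fun x => x)).getD 0)
termination_by f _ => (f, 0)
def pvDepthList (revdeps : List (String × List String)) : Nat → List String → Option (List Int)
  | _, [] => some []
  | f, p :: ps =>
    match pvDepth revdeps f p, pvDepthList revdeps f ps with
    | some v, some vs => some (v :: vs)
    | _, _ => none
termination_by f ps => (f, ps.length + 1)
end

theorem pvDepthList_none {revdeps : List (String × List String)} {f : Nat} :
    ∀ {ps : List String}, pvDepthList revdeps f ps = none → ∃ p ∈ ps, pvDepth revdeps f p = none := by
  intro ps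
  induction ps with
  | nil => simp [pvDepthList]
  | cons p ps ih =>
    intro h
    rw [pvDepthList] at h
    cases hp : pvDepth revdeps f p with
    | none => exact ⟨p, List.mem_cons_self, hp⟩
    | some v =>
      cases hps : pvDepthList revdeps f ps with
      | none =>
        obtain ⟨q, hq, hq2⟩ := ih hps
        exact ⟨q, List.mem_cons_of_mem _ hq, hq2⟩
      | some vs => rw [hp, hps] at h; simp at h

-- fuel monotonicity
theorem pvDepth_mono (revdeps : List (String × List String)) :
    ∀ (f : Nat) (n : String) (d : Int), pvDepth revdeps f n = some d →
      pvDepth revdeps (f+1) n = some d := by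
  intro f
  induction f with
  | zero => intro n d h; rw [pvDepth] at h; exact absurd h (by simp)
  | succ f ih =>
    have hlist : ∀ (ps : List String) (vs : List Int),
        pvDepthList revdeps f ps = some vs → pvDepthList revdeps (f+1) ps = some vs := by
      intro ps
      induction ps with
      | nil => simp [pvDepthList]
      | cons p ps ihl =>
        intro vs h
        rw [pvDepthList] at h
        cases hp : pvDepth revdeps f p with
        | none => rw [hp] at h; simp at h
        | some v =>
          cases hps : pvDepthList revdeps f ps with
          | none => rw [hp, hps] at h; simp at h
          | some ws =>
            rw [hp, hps] at h
            simp only [Option.some.injEq] at h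
            rw [pvDepthList, ih p v hp, ihl ws hps, ← h]
    intro n d h
    rw [pvDepth] at h ⊢
    by_cases hps : pvParents revdeps n = []
    · simpa [hps] using h
    · simp only [hps, if_false, Option.map_eq_some_iff] at h ⊢
      obtain ⟨vs, hvs, hd⟩ := h
      exact ⟨vs, hlist _ _ hvs, hd⟩

theorem pvDepth_mono_le (revdeps : List (String × List String)) {f g : Nat} (h : f ≤ g) :
    ∀ {n : String} {d : Int}, pvDepth revdeps f n = some d → pvDepth revdeps g n = some d := by
  induction g with
  | zero => intro n d hd; rw [Nat.le_zero.mp h] at hd; exact hd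
  | succ g ih =>
    intro n d hd
    rcases Nat.lt_or_ge f (g+1) with h' | h'
    · exact pvDepth_mono revdeps g n d (ih (Nat.lt_succ_iff.mp h') hd)
    · have : f = g + 1 := Nat.le_antisymm h h'
      rw [← this]; exact hd

theorem pvDepth_unique (revdeps : List (String × List String)) {f g : Nat} {n : String}
    {d e : Int} (hf : pvDepth revdeps f n = some d) (hg : pvDepth revdeps g n = some e) : d = e := by
  rcases Nat.le_total f g with h | h
  · have := pvDepth_mono_le revdeps h hf; rw [this] at hg; exact (Option.some.injEq _ _ ▸ hg).symm ▸ rfl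
  · have := pvDepth_mono_le revdeps h hg; rw [this] at hf; simpa using hf.symm

-- frontier lemmas
theorem pvFront_step {revdeps : List (String × List String)} {targets : List String}
    {k : Nat} {n p : String} (hn : n ∈ pvFront revdeps targets k)
    (hp : p ∈ pvParents revdeps n) : p ∈ pvFront revdeps targets (k+1) := by
  rw [pvFront, PySem.List.mem_dedup]
  exact List.mem_flatMap.mpr ⟨n, hn, hp⟩

theorem pvFront_empty_add {revdeps : List (String × List String)} {targets : List String}
    {N : Nat} (h : pvFront revdeps targets N = []) :
    ∀ m, pvFront revdeps targets (N + m) = [] := by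
  intro m
  induction m with
  | zero => exact h
  | succ m ih => rw [← Nat.add_assoc, pvFront, ih]; simp [PySem.List.dedup]

theorem pvDepth_none_front {revdeps : List (String × List String)} {targets : List String} :
    ∀ (f k : Nat) (n : String), n ∈ pvFront revdeps targets k →
      pvDepth revdeps f n = none → pvFront revdeps targets (k + f) ≠ [] := by
  intro f
  induction f with
  | zero =>
    intro k n hn _ hemp
    rw [Nat.add_zero] at hemp
    rw [hemp] at hn
    exact absurd hn (List.not_mem_nil)
  | succ f ih =>
    intro k n hn hd
    rw [pvDepth] at hd
    by_cases hps : pvParents revdeps n = []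
    · simp [hps] at hd
    · simp only [hps, if_false, Option.map_eq_none_iff] at hd
      obtain ⟨p, hpmem, hpd⟩ := pvDepthList_none hd
      have : k + (f + 1) = (k + 1) + f := by omega
      rw [this]
      exact ih (k+1) p (pvFront_step hn hpmem) hpd

theorem pvReach_front {revdeps : List (String × List String)} {targets : List String}
    {t n : String} (ht : t ∈ targets) (h : pvReach revdeps t n) :
    ∃ k, n ∈ pvFront revdeps targets k := by
  induction h with
  | refl => exact ⟨0, by rw [pvFront, PySem.List.mem_dedup]; exact ht⟩
  | tail _ e ih =>
    obtain ⟨k, hk⟩ := ih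
    exact ⟨k+1, pvFront_step hk e⟩

theorem pvPre_depth_some {revdeps : List (String × List String)} {targets : List String}
    (hpre : pvFront revdeps targets (revdeps.length + 1) = []) {n : String}
    (hn : pvR targets revdeps n) : ∃ d, pvDepth revdeps (revdeps.length + 1) n = some d := by
  obtain ⟨t, ht, hr⟩ := hn
  obtain ⟨k, hk⟩ := pvReach_front ht hr
  cases hd : pvDepth revdeps (revdeps.length + 1) n with
  | none =>
    exact absurd (by rw [Nat.add_comm]; exact pvFront_empty_add hpre k)
      (pvDepth_none_front _ k n hk hd)
  | some d => exact ⟨d, rfl⟩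

-- cache invariant of A's memoized depth pass
def pvInv (revdeps : List (String × List String)) (c : PySem.Dict String Int) : Prop :=
  c.keys.Nodup ∧
  (∀ k v, c.get? k = some v → ∃ f, pvDepth revdeps f k = some v) ∧
  (∀ k, c.contains k = true → ∀ p ∈ pvParents revdeps k, c.contains p = true)

theorem pvClosed_reach {revdeps : List (String × List String)}
    {contains : String → Bool}
    (hc : ∀ k, contains k = true → ∀ p ∈ pvParents revdeps k, contains p = true)
    {n k : String} (hn : contains n = true) (h : pvReach revdeps n k) : contains k = true := by
  induction h with
  | refl => exact hn
  | tail _ e ih => exact hc _ ih _ e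

theorem pvReach_head_iff {revdeps : List (String × List String)} {n k : String} :
    pvReach revdeps n k ↔ k = n ∨ ∃ p ∈ pvParents revdeps n, pvReach revdeps p k := by
  constructor
  · intro h
    rcases Relation.ReflTransGen.cases_head h with h | ⟨c, hc, hr⟩
    · exact Or.inl h.symm
    · exact Or.inr ⟨c, hc, hr⟩
  · rintro (rfl | ⟨p, hp, hr⟩)
    · exact Relation.ReflTransGen.refl
    · exact Relation.ReflTransGen.head hp hr

theorem pvInv_empty (revdeps : List (String × List String)) : pvInv revdeps PySem.Dict.empty := by
  refine ⟨by simp [PySem.Dict.keys_empty], ?_, ?_⟩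
  · intro k v h; rw [PySem.Dict.get?_empty] at h; simp at h
  · intro k h; rw [PySem.Dict.contains_empty] at h; simp at h

theorem pvVisit_ok (revdeps : List (String × List String)) :
    ∀ (f : Nat) (c : PySem.Dict String Int) (n : String) (d : Int),
      pvDepth revdeps f n = some d → pvInv revdeps c →
      (pvVisit revdeps f c n).1 = d ∧
      pvInv revdeps (pvVisit revdeps f c n).2 ∧
      (∀ k, (pvVisit revdeps f c n).2.contains k = true ↔
        (c.contains k = true ∨ pvReach revdeps n k)) := by
  intro f
  induction f with
  | zero => intro c n d h; rw [pvDepth] at h; exact absurd h (by simp)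
  | succ f ih =>
    -- list version at fuel f
    have ihl : ∀ (ps : List String) (c : PySem.Dict String Int) (vs : List Int),
        pvDepthList revdeps f ps = some vs → pvInv revdeps c →
        (pvVisitList revdeps f c ps).1 = vs ∧
        pvInv revdeps (pvVisitList revdeps f c ps).2 ∧
        (∀ k, (pvVisitList revdeps f c ps).2.contains k = true ↔
          (c.contains k = true ∨ ∃ p ∈ ps, pvReach revdeps p k)) := by
      intro ps
      induction ps with
      | nil =>
        intro c vs h hinv
        rw [pvDepthList] at h
        simp only [Option.some.injEq] at h
        rw [pvVisitList]
        exact ⟨h, hinv, by simp⟩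
      | cons p ps ihps =>
        intro c vs h hinv
        rw [pvDepthList] at h
        cases hp : pvDepth revdeps f p with
        | none => rw [hp] at h; simp at h
        | some v =>
          cases hps : pvDepthList revdeps f ps with
          | none => rw [hp, hps] at h; simp at h
          | some ws =>
            rw [hp, hps] at h
            simp only [Option.some.injEq] at h
            obtain ⟨h1, h2, h3⟩ := ih c p v hp hinv
            obtain ⟨g1, g2, g3⟩ := ihps (pvVisit revdeps f c p).2 ws hps h2
            rw [pvVisitList]
            refine ⟨by rw [h1, g1, ← h], g2, ?_⟩
            intro k
            rw [g3 k, h3 k]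
            constructor
            · rintro ((hk | hk) | hk)
              · exact Or.inl hk
              · exact Or.inr ⟨p, List.mem_cons_self, hk⟩
              · obtain ⟨q, hq, hq2⟩ := hk
                exact Or.inr ⟨q, List.mem_cons_of_mem _ hq, hq2⟩
            · rintro (hk | ⟨q, hq, hq2⟩)
              · exact Or.inl (Or.inl hk)
              · rcases List.mem_cons.mp hq with rfl | hq
                · exact Or.inl (Or.inr hq2)
                · exact Or.inr ⟨q, hq, hq2⟩
    intro c n d hd hinv
    rw [pvVisit]
    cases hget : c.get? n with
    | some v =>
      simp only
      have hcn : c.contains n = true := by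
        rw [PySem.Dict.contains_eq_isSome_get?, hget]; rfl
      obtain ⟨g, hg⟩ := hinv.2.1 n v hget
      refine ⟨pvDepth_unique revdeps hg hd, hinv, ?_⟩
      intro k
      constructor
      · exact Or.inl
      · rintro (hk | hk)
        · exact hk
        · exact pvClosed_reach hinv.2.2 hcn hk
    | none =>
      rw [pvDepth] at hd
      by_cases hps : pvParents revdeps n = []
      · simp only [hps, if_true] at hd ⊢
        simp only [Option.some.injEq] at hd
        have hncn : c.contains n = false := by
          rw [PySem.Dict.contains_eq_isSome_get?, hget]; rfl
        refine ⟨hd, ⟨?_, ?_, ?_⟩, ?_⟩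
        · exact PySem.Dict.nodup_keys_insert _ _ _ hinv.1
        · intro k v h
          rw [PySem.Dict.get?_insert] at h
          by_cases hk : k = n
          · subst hk
            rw [if_pos rfl] at h
            simp only [Option.some.injEq] at h
            exact ⟨1, by rw [pvDepth]; simp [hps, ← h]⟩
          · rw [if_neg hk] at h
            exact hinv.2.1 k v h
        · intro k hk p hp
          rw [PySem.Dict.contains_insert] at hk ⊢
          rcases Bool.or_eq_true_iff.mp hk with hk | hk
          · have : k = n := by simpa using hk
            subst this
            rw [hps] at hp
            exact absurd hp List.not_mem_nil
          · exact Bool.or_eq_true_iff.mpr (Or.inr (hinv.2.2 k hk p hp))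
        · intro k
          rw [PySem.Dict.contains_insert]
          rw [Bool.or_eq_true_iff]
          constructor
          · rintro (hk | hk)
            · have : k = n := by simpa using hk
              exact Or.inr (this ▸ Relation.ReflTransGen.refl)
            · exact Or.inl hk
          · rintro (hk | hk)
            · exact Or.inr hk
            · rcases pvReach_head_iff.mp hk with rfl | ⟨p, hp, _⟩
              · exact Or.inl (by simp)
              · rw [hps] at hp; exact absurd hp List.not_mem_nil
      · simp only [hps, if_false] at hd ⊢
        cases hlist : pvDepthList revdeps f (pvParents revdeps n) with
        | none => rw [hlist] at hd; simp at hd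
        | some vs =>
          rw [hlist] at hd
          simp only [Option.map_some, Option.some.injEq] at hd
          obtain ⟨g1, g2, g3⟩ := ihl (pvParents revdeps n) c vs hlist hinv
          simp only [g1]
          set c' := (pvVisitList revdeps f c (pvParents revdeps n)).2 with hc'
          have hdval : 1 + (PySem.List.max? vs (fun x => x)).getD 0 = d := hd
          refine ⟨hdval, ⟨?_, ?_, ?_⟩, ?_⟩
          · exact PySem.Dict.nodup_keys_insert _ _ _ g2.1
          · intro k v h
            rw [PySem.Dict.get?_insert] at h
            by_cases hk : k = n
            · subst hk
              rw [if_pos rfl] at h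
              simp only [Option.some.injEq] at h
              refine ⟨f + 1, ?_⟩
              rw [pvDepth]
              simp [hps, hlist, ← h, hdval]
            · rw [if_neg hk] at h
              exact g2.2.1 k v h
          · intro k hk p hp
            rw [PySem.Dict.contains_insert] at hk ⊢
            rw [Bool.or_eq_true_iff] at hk ⊢
            rcases hk with hk | hk
            · have : k = n := by simpa using hk
              subst this
              refine Or.inr ((g3 p).mpr (Or.inr ⟨p, hp, Relation.ReflTransGen.refl⟩))
            · exact Or.inr (g2.2.2 k hk p hp)
          · intro k
            rw [PySem.Dict.contains_insert, Bool.or_eq_true_iff, g3 k]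
            constructor
            · rintro (hk | hk | hk)
              · have : k = n := by simpa using hk
                exact Or.inr (this ▸ Relation.ReflTransGen.refl)
              · exact Or.inl hk
              · obtain ⟨p, hp, hr⟩ := hk
                exact Or.inr (pvReach_head_iff.mpr (Or.inr ⟨p, hp, hr⟩))
            · rintro (hk | hk)
              · exact Or.inr (Or.inl hk)
              · rcases pvReach_head_iff.mp hk with rfl | ⟨p, hp, hr⟩
                · exact Or.inl (by simp)
                · exact Or.inr (Or.inr ⟨p, hp, hr⟩)

theorem pvFold_ok (revdeps : List (String × List String)) (F : Nat) :
    ∀ (starts : List String) (c : PySem.Dict String Int),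
      pvInv revdeps c → (∀ t ∈ starts, ∃ d, pvDepth revdeps F t = some d) →
      pvInv revdeps (starts.foldl (fun c t => (pvVisit revdeps F c t).2) c) ∧
      (∀ k, (starts.foldl (fun c t => (pvVisit revdeps F c t).2) c).contains k = true ↔
        (c.contains k = true ∨ ∃ t ∈ starts, pvReach revdeps t k)) := by
  intro starts
  induction starts with
  | nil => intro c hinv _; exact ⟨hinv, by simp⟩
  | cons t ts ih =>
    intro c hinv hstart
    obtain ⟨d, hd⟩ := hstart t List.mem_cons_self
    obtain ⟨_, h2, h3⟩ := pvVisit_ok revdeps F c t d hd hinv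
    obtain ⟨g1, g2⟩ := ih (pvVisit revdeps F c t).2 h2
      (fun u hu => hstart u (List.mem_cons_of_mem _ hu))
    rw [List.foldl_cons]
    refine ⟨g1, ?_⟩
    intro k
    rw [g2 k, h3 k]
    constructor
    · rintro ((hk | hk) | ⟨u, hu, hr⟩)
      · exact Or.inl hk
      · exact Or.inr ⟨t, List.mem_cons_self, hk⟩
      · exact Or.inr ⟨u, List.mem_cons_of_mem _ hu, hr⟩
    · rintro (hk | ⟨u, hu, hr⟩)
      · exact Or.inl (Or.inl hk)
      · rcases List.mem_cons.mp hu with rfl | hu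
        · exact Or.inl (Or.inr hr)
        · exact Or.inr ⟨u, hu, hr⟩

-- ===== BFS lemmas (A side) =====

theorem pvBfs_mono (revdeps : List (String × List String)) (univ : List String) :
    ∀ (seen : PySem.Dict String Bool) (q : List String) (k : String),
      seen.contains k = true → (pvBfs revdeps univ seen q).contains k = true := by
  intro seen q
  induction seen, q using pvBfs.induct revdeps univ with
  | case1 seen => intro k hk; rw [pvBfs]; exact hk
  | case2 seen cur rest hcur ih =>
    intro k hk; rw [pvBfs, if_pos hcur]; exact ih k hk
  | case3 seen cur rest hcur huniv ih =>
    intro k hk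
    rw [pvBfs, if_neg hcur, if_pos huniv]
    refine ih k ?_
    rw [PySem.Dict.contains_insert, Bool.or_eq_true_iff]
    exact Or.inr hk
  | case4 seen cur rest hcur huniv ih =>
    intro k hk
    rw [pvBfs, if_neg hcur, if_neg huniv]
    refine ih k ?_
    rw [PySem.Dict.contains_insert, Bool.or_eq_true_iff]
    exact Or.inr hk

theorem pvBfs_mem_q (revdeps : List (String × List String)) (univ : List String) :
    ∀ (seen : PySem.Dict String Bool) (q : List String) (x : String),
      x ∈ q → (pvBfs revdeps univ seen q).contains x = true := by
  intro seen q
  induction seen, q using pvBfs.induct revdeps univ with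
  | case1 seen => intro x hx; exact absurd hx List.not_mem_nil
  | case2 seen cur rest hcur ih =>
    intro x hx
    rw [pvBfs, if_pos hcur]
    rcases List.mem_cons.mp hx with rfl | hx
    · exact pvBfs_mono revdeps univ seen rest x hcur
    · exact ih x hx
  | case3 seen cur rest hcur huniv ih =>
    intro x hx
    rw [pvBfs, if_neg hcur, if_pos huniv]
    rcases List.mem_cons.mp hx with rfl | hx
    · refine pvBfs_mono revdeps univ _ _ x ?_
      rw [PySem.Dict.contains_insert, Bool.or_eq_true_iff]
      exact Or.inl (by simp)
    · exact ih x (List.mem_append_left _ hx)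
  | case4 seen cur rest hcur huniv ih =>
    intro x hx
    rw [pvBfs, if_neg hcur, if_neg huniv]
    rcases List.mem_cons.mp hx with rfl | hx
    · refine pvBfs_mono revdeps univ _ _ x ?_
      rw [PySem.Dict.contains_insert, Bool.or_eq_true_iff]
      exact Or.inl (by simp)
    · exact ih x hx

theorem pvBfs_sound (revdeps : List (String × List String)) (univ : List String) :
    ∀ (seen : PySem.Dict String Bool) (q : List String) (k : String),
      (pvBfs revdeps univ seen q).contains k = true →
      seen.contains k = true ∨ ∃ x ∈ q, pvReach revdeps x k := by
  intro seen q
  induction seen, q using pvBfs.induct revdeps univ with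
  | case1 seen => intro k hk; rw [pvBfs] at hk; exact Or.inl hk
  | case2 seen cur rest hcur ih =>
    intro k hk
    rw [pvBfs, if_pos hcur] at hk
    rcases ih k hk with hk | ⟨x, hx, hr⟩
    · exact Or.inl hk
    · exact Or.inr ⟨x, List.mem_cons_of_mem _ hx, hr⟩
  | case3 seen cur rest hcur huniv ih =>
    intro k hk
    rw [pvBfs, if_neg hcur, if_pos huniv] at hk
    rcases ih k hk with hk | ⟨x, hx, hr⟩
    · rw [PySem.Dict.contains_insert, Bool.or_eq_true_iff] at hk
      rcases hk with hk | hk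
      · exact Or.inr ⟨cur, List.mem_cons_self, by simp at hk; exact hk ▸ Relation.ReflTransGen.refl⟩
      · exact Or.inl hk
    · rcases List.mem_append.mp hx with hx | hx
      · exact Or.inr ⟨x, List.mem_cons_of_mem _ hx, hr⟩
      · exact Or.inr ⟨cur, List.mem_cons_self, Relation.ReflTransGen.head hx hr⟩
  | case4 seen cur rest hcur huniv ih =>
    intro k hk
    rw [pvBfs, if_neg hcur, if_neg huniv] at hk
    rcases ih k hk with hk | ⟨x, hx, hr⟩
    · rw [PySem.Dict.contains_insert, Bool.or_eq_true_iff] at hk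
      rcases hk with hk | hk
      · exact Or.inr ⟨cur, List.mem_cons_self, by simp at hk; exact hk ▸ Relation.ReflTransGen.refl⟩
      · exact Or.inl hk
    · exact Or.inr ⟨x, List.mem_cons_of_mem _ hx, hr⟩

theorem pvBfs_nodup (revdeps : List (String × List String)) (univ : List String) :
    ∀ (seen : PySem.Dict String Bool) (q : List String),
      seen.keys.Nodup → (pvBfs revdeps univ seen q).keys.Nodup := by
  intro seen q
  induction seen, q using pvBfs.induct revdeps univ with
  | case1 seen => intro h; rw [pvBfs]; exact h
  | case2 seen cur rest hcur ih => intro h; rw [pvBfs, if_pos hcur]; exact ih h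
  | case3 seen cur rest hcur huniv ih =>
    intro h; rw [pvBfs, if_neg hcur, if_pos huniv]
    exact ih (PySem.Dict.nodup_keys_insert _ _ _ h)
  | case4 seen cur rest hcur huniv ih =>
    intro h; rw [pvBfs, if_neg hcur, if_neg huniv]
    exact ih (PySem.Dict.nodup_keys_insert _ _ _ h)

theorem pvBfs_closed (revdeps : List (String × List String)) (univ : List String)
    (hp : ∀ m p, p ∈ pvParents revdeps m → p ∈ univ) :
    ∀ (seen : PySem.Dict String Bool) (q : List String),
      (∀ x ∈ q, x ∈ univ) →
      (∀ m, seen.contains m = true → ∀ p ∈ pvParents revdeps m,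
        seen.contains p = true ∨ p ∈ q) →
      ∀ m, (pvBfs revdeps univ seen q).contains m = true →
        ∀ p ∈ pvParents revdeps m, (pvBfs revdeps univ seen q).contains p = true := by
  intro seen q
  induction seen, q using pvBfs.induct revdeps univ with
  | case1 seen =>
    intro _ hinv m hm p hpp
    rw [pvBfs] at hm ⊢
    rcases hinv m hm p hpp with h | h
    · exact h
    · exact absurd h List.not_mem_nil
  | case2 seen cur rest hcur ih =>
    intro hq hinv
    rw [pvBfs, if_pos hcur]
    refine ih (fun x hx => hq x (List.mem_cons_of_mem _ hx)) ?_
    intro m hm p hpp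
    rcases hinv m hm p hpp with h | h
    · exact Or.inl h
    · rcases List.mem_cons.mp h with rfl | h
      · exact Or.inl hcur
      · exact Or.inr h
  | case3 seen cur rest hcur huniv ih =>
    intro hq hinv
    rw [pvBfs, if_neg hcur, if_pos huniv]
    refine ih ?_ ?_
    · intro x hx
      rcases List.mem_append.mp hx with hx | hx
      · exact hq x (List.mem_cons_of_mem _ hx)
      · exact hp cur x hx
    · intro m hm p hpp
      rw [PySem.Dict.contains_insert, Bool.or_eq_true_iff] at hm
      rcases hm with hm | hm
      · have : m = cur := by simpa using hm
        subst this
        exact Or.inr (List.mem_append_right _ hpp)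
      · rcases hinv m hm p hpp with h | h
        · exact Or.inl (by rw [PySem.Dict.contains_insert, Bool.or_eq_true_iff]; exact Or.inr h)
        · rcases List.mem_cons.mp h with rfl | h
          · exact Or.inl (by rw [PySem.Dict.contains_insert, Bool.or_eq_true_iff]; exact Or.inl (by simp))
          · exact Or.inr (List.mem_append_left _ h)
  | case4 seen cur rest hcur huniv ih =>
    intro hq _ m hm p hpp
    exact absurd (hq cur List.mem_cons_self) huniv

-- ===== B-side lemmas =====

-- the list depth is the pointwise total depth
theorem pvDepthList_eq_map (revdeps : List (String × List String)) {f : Nat} :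
    ∀ {ps : List String} {vs : List Int}, pvDepthList revdeps f ps = some vs →
      (∀ p ∈ ps, ∃ v, pvDepth revdeps f p = some v) ∧
      vs = ps.map (fun p => (pvDepth revdeps f p).getD 0) := by
  intro ps
  induction ps with
  | nil =>
    intro vs h
    rw [pvDepthList] at h
    simp only [Option.some.injEq] at h
    exact ⟨by simp, by simp [← h]⟩
  | cons p ps ih =>
    intro vs h
    rw [pvDepthList] at h
    cases hp : pvDepth revdeps f p with
    | none => rw [hp] at h; simp at h
    | some v =>
      cases hps : pvDepthList revdeps f ps with
      | none => rw [hp, hps] at h; simp at h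
      | some ws =>
        rw [hp, hps] at h
        simp only [Option.some.injEq] at h
        obtain ⟨ih1, ih2⟩ := ih hps
        refine ⟨?_, ?_⟩
        · intro q hq
          rcases List.mem_cons.mp hq with rfl | hq
          · exact ⟨v, hp⟩
          · exact ih1 q hq
        · rw [← h, List.map_cons, ← ih2, hp]
          simp

-- bounds on the pure depth: 0 ≤ d and d + 1 ≤ fuel
theorem pvDepth_bounds (revdeps : List (String × List String)) :
    ∀ (f : Nat) (n : String) (d : Int), pvDepth revdeps f n = some d →
      0 ≤ d ∧ d + 1 ≤ (f : Int) := by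
  intro f
  induction f with
  | zero => intro n d h; rw [pvDepth] at h; exact absurd h (by simp)
  | succ f ih =>
    intro n d h
    rw [pvDepth] at h
    by_cases hps : pvParents revdeps n = []
    · simp only [hps, if_true, Option.some.injEq] at h
      constructor <;> omega
    · simp only [hps, if_false, Option.map_eq_some_iff] at h
      obtain ⟨vs, hvs, hd⟩ := h
      obtain ⟨hex, hmap⟩ := pvDepthList_eq_map revdeps hvs
      have hvsne : vs ≠ [] := by
        rw [hmap]
        simpa [List.map_eq_nil_iff] using hps
      cases hm : PySem.List.max? vs (fun x => x) with
      | none => rw [PySem.List.max?_eq_none_iff] at hm; exact absurd hm hvsne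
      | some m =>
        have hmmem : m ∈ vs := PySem.List.max?_mem hm
        rw [hmap] at hmmem
        obtain ⟨p, hp, hpv⟩ := List.mem_map.mp hmmem
        obtain ⟨v, hv⟩ := hex p hp
        have hbv := ih p v hv
        rw [hv] at hpv
        simp only [Option.getD_some] at hpv
        rw [hm] at hd
        simp only [Option.getD_some] at hd
        subst hd
        subst hpv
        push_cast
        omega

-- characterisation of the depth of a node with parents, at fuel f+1
theorem pvDepth_char (revdeps : List (String × List String)) {f : Nat} {n : String} {d : Int}
    (hd : pvDepth revdeps (f+1) n = some d) (hps : pvParents revdeps n ≠ []) :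
    d = 1 + (PySem.List.max? ((pvParents revdeps n).map
        (fun p => (pvDepth revdeps (f+1) p).getD 0)) (fun x => x)).getD 0 ∧
    ∀ p ∈ pvParents revdeps n, ∃ dp, pvDepth revdeps (f+1) p = some dp ∧ dp + 1 ≤ d := by
  rw [pvDepth] at hd
  simp only [hps, if_false, Option.map_eq_some_iff] at hd
  obtain ⟨vs, hvs, hdd⟩ := hd
  obtain ⟨hex, hmap⟩ := pvDepthList_eq_map revdeps hvs
  have hmapeq : (pvParents revdeps n).map (fun p => (pvDepth revdeps f p).getD 0)
      = (pvParents revdeps n).map (fun p => (pvDepth revdeps (f+1) p).getD 0) := by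
    refine List.map_congr_left ?_
    intro p hp
    obtain ⟨v, hv⟩ := hex p hp
    rw [hv, pvDepth_mono revdeps f p v hv]
  have hvsne : vs ≠ [] := by
    rw [hmap]
    simpa [List.map_eq_nil_iff] using hps
  constructor
  · rw [← hdd, hmap, hmapeq]
  · intro p hp
    obtain ⟨v, hv⟩ := hex p hp
    refine ⟨v, pvDepth_mono revdeps f p v hv, ?_⟩
    have hvmem : v ∈ vs := by
      rw [hmap]
      refine List.mem_map.mpr ⟨p, hp, ?_⟩
      rw [hv]; rfl
    cases hm : PySem.List.max? vs (fun x => x) with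
    | none => rw [PySem.List.max?_eq_none_iff] at hm; exact absurd hm hvsne
    | some m =>
      have hle := PySem.List.max?_isMax hm v hvmem
      rw [hm] at hdd
      simp only [Option.getD_some] at hdd
      omega

-- correctness of B's frontier expansion
theorem pvExpand_spec (revdeps : List (String × List String)) (univ : List String)
    (hp : ∀ m p, p ∈ pvParents revdeps m → p ∈ univ) :
    ∀ (closure frontier : PySem.Set String),
      closure.Nodup →
      (∀ x ∈ frontier, x ∈ univ ∧ x ∉ closure) →
      (∀ n ∈ closure, ∀ p ∈ pvParents revdeps n, p ∈ closure ∨ p ∈ frontier) →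
      (pvExpand revdeps univ closure frontier).Nodup ∧
      (∀ x ∈ closure, x ∈ pvExpand revdeps univ closure frontier) ∧
      (∀ x ∈ frontier, x ∈ pvExpand revdeps univ closure frontier) ∧
      (∀ n ∈ pvExpand revdeps univ closure frontier, ∀ p ∈ pvParents revdeps n,
        p ∈ pvExpand revdeps univ closure frontier) ∧
      (∀ k ∈ pvExpand revdeps univ closure frontier,
        k ∈ closure ∨ ∃ x ∈ frontier, pvReach revdeps x k) := by
  intro closure frontier
  induction closure, frontier using pvExpand.induct revdeps univ with
  | case1 closure =>
    intro hnd _ hclosed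
    rw [pvExpand, if_pos rfl]
    refine ⟨hnd, fun x hx => hx, by simp, ?_, fun k hk => Or.inl hk⟩
    intro n hn p hp
    rcases hclosed n hn p hp with h' | h'
    · exact h'
    · exact absurd h' List.not_mem_nil
  | case2 closure frontier hne hguard ih =>
    simp only [List.flatMap_subtype, List.unattach_attach] at ih
    intro hnd hfr hclosed
    rw [pvExpand, if_neg hne, dif_pos hguard]
    set C' := PySem.Set.union closure frontier with hC'
    set F' := PySem.Set.diff (PySem.Set.ofList (frontier.flatMap (pvParents revdeps))) C' with hF'
    have hsubC : ∀ x, x ∈ closure ∨ x ∈ frontier → x ∈ C' := by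
      intro x hx
      exact (PySem.Set.mem_union closure frontier x).2 hx
    have hmemC' : ∀ x, x ∈ C' → x ∈ closure ∨ x ∈ frontier := by
      intro x hx
      exact (PySem.Set.mem_union closure frontier x).1 hx
    have h1 : C'.Nodup := PySem.Set.nodup_union closure frontier hnd
    have h2 : ∀ x ∈ F', x ∈ univ ∧ x ∉ C' := by
      intro x hx
      obtain ⟨hx1, hx2⟩ := (PySem.Set.mem_diff _ _ x).1 hx
      rw [PySem.Set.mem_ofList] at hx1
      obtain ⟨m, _, hpm⟩ := List.mem_flatMap.mp hx1
      exact ⟨hp m x hpm, hx2⟩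
    have h3 : ∀ n ∈ C', ∀ p ∈ pvParents revdeps n, p ∈ C' ∨ p ∈ F' := by
      intro n hn p hpp
      rcases hmemC' n hn with hn' | hn'
      · rcases hclosed n hn' p hpp with h' | h'
        · exact Or.inl (hsubC p (Or.inl h'))
        · exact Or.inl (hsubC p (Or.inr h'))
      · by_cases hc : p ∈ C'
        · exact Or.inl hc
        · refine Or.inr ((PySem.Set.mem_diff _ _ p).2 ⟨?_, hc⟩)
          rw [PySem.Set.mem_ofList]
          exact List.mem_flatMap.mpr ⟨n, hn', hpp⟩
    obtain ⟨iN, iC, iF, iCl, iS⟩ := ih h1 h2 h3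
    refine ⟨iN, ?_, ?_, iCl, ?_⟩
    · intro x hx; exact iC x (hsubC x (Or.inl hx))
    · intro x hx; exact iC x (hsubC x (Or.inr hx))
    · intro k hk
      rcases iS k hk with hk' | ⟨x, hxF, hr⟩
      · rcases hmemC' k hk' with h' | h'
        · exact Or.inl h'
        · exact Or.inr ⟨k, h', Relation.ReflTransGen.refl⟩
      · obtain ⟨hx1, _⟩ := (PySem.Set.mem_diff _ _ x).1 hxF
        rw [PySem.Set.mem_ofList] at hx1
        obtain ⟨m, hmF, hpm⟩ := List.mem_flatMap.mp hx1
        exact Or.inr ⟨m, hmF, Relation.ReflTransGen.head hpm hr⟩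
  | case3 closure frontier hne hguard =>
    intro _ hfr _
    exact absurd hfr hguard

-- membership version of reachability closure
theorem pvClosed_reach_mem {revdeps : List (String × List String)} {S : List String}
    (hc : ∀ n ∈ S, ∀ p ∈ pvParents revdeps n, p ∈ S)
    {n k : String} (hn : n ∈ S) (h : pvReach revdeps n k) : k ∈ S := by
  induction h with
  | refl => exact hn
  | tail _ e ih => exact hc _ ih _ e

-- dict.fromkeys(nodes, 0)
theorem pvInit_get? : ∀ (l : List String) (d : PySem.Dict String Int) (n : String),
    (l.foldl (fun d n => PySem.Dict.insert d n (0 : Int)) d).get? n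
      = if n ∈ l then some 0 else d.get? n := by
  intro l
  induction l with
  | nil => intro d n; simp
  | cons a l ih =>
    intro d n
    rw [List.foldl_cons, ih]
    by_cases hl : n ∈ l
    · simp [hl, List.mem_cons]
    · rw [if_neg hl, PySem.Dict.get?_insert]
      by_cases ha : n = a
      · simp [ha]
      · simp [ha, hl, List.mem_cons]

-- a fold of relaxation steps leaves keys outside the list untouched
theorem pvFoldStepF_get?_notmem (revdeps : List (String × List String)) :
    ∀ (l : List String) (st : PySem.Dict String Int × Bool) (n : String), n ∉ l →
      (l.foldl (pvStepF revdeps) st).1.get? n = st.1.get? n := by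
  intro l
  induction l with
  | nil => intro st n _; rfl
  | cons a l ih =>
    intro st n hn
    have hna : n ≠ a := fun h => hn (h ▸ List.mem_cons_self)
    have hnl : n ∉ l := fun h => hn (List.mem_cons_of_mem _ h)
    rw [List.foldl_cons, ih _ _ hnl]
    rw [pvStepF]
    by_cases hps : pvParents revdeps a = []
    · simp [hps]
    · simp only [hps, if_false]
      by_cases hw : 1 + (PySem.List.max? ((pvParents revdeps a).map (fun p => st.1.getD p 0))
          (fun x => x)).getD 0 = st.1.getD a 0
      · rw [if_pos hw]
      · rw [if_neg hw]
        show (st.1.insert a _).get? n = st.1.get? n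
        rw [PySem.Dict.get?_insert, if_neg hna]

-- one relaxation step on node n: preserves the stage-j invariant, and gives n a
-- value that is exact as soon as all parents are exact (depth of n at most j+1)
theorem pvStepF_ok (revdeps : List (String × List String)) (nodes : List String)
    (hdep : ∀ n ∈ nodes, ∃ d, pvDepth revdeps (revdeps.length + 1) n = some d)
    (hcl : ∀ n ∈ nodes, ∀ p ∈ pvParents revdeps n, p ∈ nodes) (j : Nat)
    (c : PySem.Dict String Int) (b : Bool)
    (hinv : ∀ n ∈ nodes, ∃ v, c.get? n = some v ∧
      v ≤ (pvDepth revdeps (revdeps.length + 1) n).getD 0 ∧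
      ((pvDepth revdeps (revdeps.length + 1) n).getD 0 ≤ (j : Int) →
        v = (pvDepth revdeps (revdeps.length + 1) n).getD 0))
    (n : String) (hn : n ∈ nodes) :
    (∀ m ∈ nodes, ∃ v, (pvStepF revdeps (c, b) n).1.get? m = some v ∧
      v ≤ (pvDepth revdeps (revdeps.length + 1) m).getD 0 ∧
      ((pvDepth revdeps (revdeps.length + 1) m).getD 0 ≤ (j : Int) →
        v = (pvDepth revdeps (revdeps.length + 1) m).getD 0)) ∧
    (∃ v, (pvStepF revdeps (c, b) n).1.get? n = some v ∧
      ((pvDepth revdeps (revdeps.length + 1) n).getD 0 ≤ (j : Int) + 1 →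
        v = (pvDepth revdeps (revdeps.length + 1) n).getD 0)) := by
  obtain ⟨dn, hdn⟩ := hdep n hn
  have hDn : (pvDepth revdeps (revdeps.length + 1) n).getD 0 = dn := by rw [hdn]; rfl
  by_cases hps : pvParents revdeps n = []
  · have hstep : (pvStepF revdeps (c, b) n).1 = c := by simp [pvStepF, hps]
    have hdn0 : dn = 0 := by
      rw [pvDepth] at hdn
      simp only [hps, if_true, Option.some.injEq] at hdn
      omega
    obtain ⟨v, hv, hle, hex⟩ := hinv n hn
    have hv0 : v = dn := by
      refine hex ?_ |>.trans hDn
      rw [hDn, hdn0]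
      exact Int.natCast_nonneg j
    refine ⟨?_, ?_⟩
    · rw [hstep]; exact hinv
    · rw [hstep]; exact ⟨v, hv, fun _ => hv0.trans hDn.symm⟩
  · obtain ⟨hchar1, hchar2⟩ := pvDepth_char revdeps hdn hps
    set w := 1 + (PySem.List.max? ((pvParents revdeps n).map (fun p => c.getD p 0))
      (fun x => x)).getD 0 with hw
    have hpar : ∀ p ∈ pvParents revdeps n, c.getD p 0 ≤
        (pvDepth revdeps (revdeps.length + 1) p).getD 0 ∧
        (pvDepth revdeps (revdeps.length + 1) p).getD 0 + 1 ≤ dn ∧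
        ((pvDepth revdeps (revdeps.length + 1) p).getD 0 ≤ (j : Int) →
          c.getD p 0 = (pvDepth revdeps (revdeps.length + 1) p).getD 0) := by
      intro p hp
      obtain ⟨vp, hvp, hvle, hvex⟩ := hinv p (hcl n hn p hp)
      have hgd : c.getD p 0 = vp := by
        rw [PySem.Dict.getD_eq_get?_getD, hvp]; rfl
      obtain ⟨dp, hdp, hdple⟩ := hchar2 p hp
      have hDp : (pvDepth revdeps (revdeps.length + 1) p).getD 0 = dp := by rw [hdp]; rfl
      exact ⟨hgd ▸ hvle, by rw [hDp]; exact hdple, fun h' => hgd.trans (hvex h')⟩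
    have hmlne : (pvParents revdeps n).map (fun p => c.getD p 0) ≠ [] := by
      simpa [List.map_eq_nil_iff] using hps
    have hwle : w ≤ dn := by
      cases hm : PySem.List.max? ((pvParents revdeps n).map (fun p => c.getD p 0))
          (fun x => x) with
      | none => rw [PySem.List.max?_eq_none_iff] at hm; exact absurd hm hmlne
      | some m =>
        have hmmem := PySem.List.max?_mem hm
        obtain ⟨p0, hp0, hmv⟩ := List.mem_map.mp hmmem
        obtain ⟨h1, h2, _⟩ := hpar p0 hp0
        rw [hw, hm]
        simp only [Option.getD_some]
        omega
    have hwex : dn ≤ (j : Int) + 1 → w = dn := by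
      intro hdnj
      have hmapeq : (pvParents revdeps n).map (fun p => c.getD p 0)
          = (pvParents revdeps n).map
            (fun p => (pvDepth revdeps (revdeps.length + 1) p).getD 0) := by
        refine List.map_congr_left ?_
        intro p hp
        obtain ⟨_, h2, h3⟩ := hpar p hp
        exact h3 (by omega)
      rw [hw, hmapeq, ← hchar1]
    by_cases heq : w = c.getD n 0
    · -- the computed value already stored: the step leaves the state unchanged
      have hstep : (pvStepF revdeps (c, b) n).1 = c := by
        simp only [pvStepF, hps, if_false]
        rw [← hw, if_pos heq]
      obtain ⟨v, hv, hle, hex⟩ := hinv n hn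
      have hgdn : c.getD n 0 = v := by
        rw [PySem.Dict.getD_eq_get?_getD, hv]; rfl
      refine ⟨?_, ?_⟩
      · rw [hstep]; exact hinv
      · rw [hstep]
        refine ⟨v, hv, ?_⟩
        intro h'
        rw [hDn] at h' ⊢
        rw [← hgdn, ← heq]
        exact hwex h'
    · have hstep : (pvStepF revdeps (c, b) n).1 = c.insert n w := by
        simp only [pvStepF, hps, if_false]
        rw [← hw, if_neg heq]
      refine ⟨?_, ?_⟩
      · intro m hm
        by_cases hmn : m = n
        · subst hmn
          refine ⟨w, by rw [hstep]; exact PySem.Dict.get?_insert_self c m w, ?_, ?_⟩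
          · rw [hDn]; exact hwle
          · intro h'
            rw [hDn] at h' ⊢
            exact hwex (by omega)
        · obtain ⟨v, hv, hle, hex⟩ := hinv m hm
          refine ⟨v, ?_, hle, hex⟩
          rw [hstep, PySem.Dict.get?_insert, if_neg hmn]
          exact hv
      · refine ⟨w, by rw [hstep]; exact PySem.Dict.get?_insert_self c n w, ?_⟩
        intro h'
        rw [hDn] at h' ⊢
        exact hwex h'

-- one full relaxation pass: preserves the stage-j invariant and fixes every
-- processed node whose depth is at most j+1
theorem pvPassF_fold (revdeps : List (String × List String)) (nodes : List String)
    (hdep : ∀ n ∈ nodes, ∃ d, pvDepth revdeps (revdeps.length + 1) n = some d)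
    (hcl : ∀ n ∈ nodes, ∀ p ∈ pvParents revdeps n, p ∈ nodes) (j : Nat) :
    ∀ (l : List String) (c : PySem.Dict String Int) (b : Bool), (∀ n ∈ l, n ∈ nodes) →
      (∀ n ∈ nodes, ∃ v, c.get? n = some v ∧
        v ≤ (pvDepth revdeps (revdeps.length + 1) n).getD 0 ∧
        ((pvDepth revdeps (revdeps.length + 1) n).getD 0 ≤ (j : Int) →
          v = (pvDepth revdeps (revdeps.length + 1) n).getD 0)) →
      (∀ n ∈ nodes, ∃ v, (l.foldl (pvStepF revdeps) (c, b)).1.get? n = some v ∧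
        v ≤ (pvDepth revdeps (revdeps.length + 1) n).getD 0 ∧
        ((pvDepth revdeps (revdeps.length + 1) n).getD 0 ≤ (j : Int) →
          v = (pvDepth revdeps (revdeps.length + 1) n).getD 0)) ∧
      (∀ n ∈ l, ∃ v, (l.foldl (pvStepF revdeps) (c, b)).1.get? n = some v ∧
        ((pvDepth revdeps (revdeps.length + 1) n).getD 0 ≤ (j : Int) + 1 →
          v = (pvDepth revdeps (revdeps.length + 1) n).getD 0)) := by
  intro l
  induction l with
  | nil => intro c b _ hinv; exact ⟨hinv, by simp⟩
  | cons n l ih =>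
    intro c b hl hinv
    have hn : n ∈ nodes := hl n List.mem_cons_self
    obtain ⟨hinv1, hhead⟩ := pvStepF_ok revdeps nodes hdep hcl j c b hinv n hn
    obtain ⟨ih1, ih2⟩ := ih (pvStepF revdeps (c, b) n).1 (pvStepF revdeps (c, b) n).2
      (fun m hm => hl m (List.mem_cons_of_mem _ hm)) hinv1
    rw [List.foldl_cons]
    refine ⟨ih1, ?_⟩
    intro m hm
    rcases List.mem_cons.mp hm with rfl | hm
    · by_cases hml : m ∈ l
      · exact ih2 m hml
      · obtain ⟨v, hv, hex⟩ := hhead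
        refine ⟨v, ?_, hex⟩
        rw [pvFoldStepF_get?_notmem revdeps l _ m hml]
        exact hv
    · exact ih2 m hm

-- a pass whose flag comes back false changed nothing: the dict is a fixpoint of
-- the relaxation equations on every processed node
theorem pvPassF_false (revdeps : List (String × List String)) :
    ∀ (l : List String) (st : PySem.Dict String Int × Bool),
      (l.foldl (pvStepF revdeps) st).2 = false →
      st.2 = false ∧ (l.foldl (pvStepF revdeps) st).1 = st.1 ∧
      ∀ n ∈ l, pvParents revdeps n = [] ∨
        1 + (PySem.List.max? ((pvParents revdeps n).map (fun p => st.1.getD p 0))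
          (fun x => x)).getD 0 = st.1.getD n 0 := by
  intro l
  induction l with
  | nil => intro st h; exact ⟨h, rfl, by simp⟩
  | cons n l ih =>
    intro st h
    rw [List.foldl_cons] at h ⊢
    obtain ⟨hb1, hfst, hprops⟩ := ih (pvStepF revdeps st n) h
    by_cases hps : pvParents revdeps n = []
    · have hstep : pvStepF revdeps st n = st := by simp [pvStepF, hps]
      rw [hstep] at hb1 hfst hprops ⊢
      refine ⟨hb1, hfst, ?_⟩
      intro m hm
      rcases List.mem_cons.mp hm with rfl | hm
      · exact Or.inl hps
      · exact hprops m hm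
    · by_cases hw : 1 + (PySem.List.max? ((pvParents revdeps n).map (fun p => st.1.getD p 0))
          (fun x => x)).getD 0 = st.1.getD n 0
      · have hstep : pvStepF revdeps st n = st := by
          simp only [pvStepF, hps, if_false]
          rw [if_pos hw]
        rw [hstep] at hb1 hfst hprops ⊢
        refine ⟨hb1, hfst, ?_⟩
        intro m hm
        rcases List.mem_cons.mp hm with rfl | hm
        · exact Or.inr hw
        · exact hprops m hm
      · have hstep : pvStepF revdeps st n = (st.1.insert n
            (1 + (PySem.List.max? ((pvParents revdeps n).map (fun p => st.1.getD p 0))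
              (fun x => x)).getD 0), true) := by
          simp only [pvStepF, hps, if_false]
          rw [if_neg hw]
        rw [hstep] at hb1
        exact absurd hb1 (by simp)

-- a fixpoint of the relaxation equations holds the exact depths
theorem pvFix_exact (revdeps : List (String × List String)) (nodes : List String)
    (hdep : ∀ n ∈ nodes, ∃ d, pvDepth revdeps (revdeps.length + 1) n = some d)
    (hcl : ∀ n ∈ nodes, ∀ p ∈ pvParents revdeps n, p ∈ nodes)
    (c : PySem.Dict String Int)
    (hinv : ∀ n ∈ nodes, ∃ v, c.get? n = some v ∧
      v ≤ (pvDepth revdeps (revdeps.length + 1) n).getD 0 ∧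
      ((pvDepth revdeps (revdeps.length + 1) n).getD 0 ≤ 0 →
        v = (pvDepth revdeps (revdeps.length + 1) n).getD 0))
    (hfix : ∀ n ∈ nodes, pvParents revdeps n = [] ∨
      1 + (PySem.List.max? ((pvParents revdeps n).map (fun p => c.getD p 0))
        (fun x => x)).getD 0 = c.getD n 0) :
    ∀ n ∈ nodes, c.getD n 0 = (pvDepth revdeps (revdeps.length + 1) n).getD 0 := by
  suffices H : ∀ (k : Nat), ∀ n ∈ nodes,
      (pvDepth revdeps (revdeps.length + 1) n).getD 0 ≤ (k : Int) →
      c.getD n 0 = (pvDepth revdeps (revdeps.length + 1) n).getD 0 by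
    intro n hn
    obtain ⟨d, hd⟩ := hdep n hn
    obtain ⟨hd0, _⟩ := pvDepth_bounds revdeps _ n d hd
    refine H d.toNat n hn ?_
    rw [hd]
    simp only [Option.getD_some]
    omega
  intro k
  induction k with
  | zero =>
    intro n hn hk
    obtain ⟨v, hv, hle, hex⟩ := hinv n hn
    rw [PySem.Dict.getD_eq_get?_getD, hv]
    simpa using hex (by simpa using hk)
  | succ k ih =>
    intro n hn hk
    obtain ⟨d, hd⟩ := hdep n hn
    have hD : (pvDepth revdeps (revdeps.length + 1) n).getD 0 = d := by rw [hd]; rfl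
    by_cases hdk : (pvDepth revdeps (revdeps.length + 1) n).getD 0 ≤ (k : Int)
    · exact ih n hn hdk
    · have hps : pvParents revdeps n ≠ [] := by
        intro hps
        rw [pvDepth] at hd
        simp only [hps, if_true, Option.some.injEq] at hd
        rw [hD] at hdk
        omega
      obtain ⟨hchar1, hchar2⟩ := pvDepth_char revdeps hd hps
      rcases hfix n hn with h' | h'
      · exact absurd h' hps
      · have hmapeq : (pvParents revdeps n).map (fun p => c.getD p 0)
            = (pvParents revdeps n).map
              (fun p => (pvDepth revdeps (revdeps.length + 1) p).getD 0) := by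
          refine List.map_congr_left ?_
          intro p hp
          obtain ⟨dp, hdp, hdple⟩ := hchar2 p hp
          refine ih p (hcl n hn p hp) ?_
          rw [hdp]
          simp only [Option.getD_some]
          push_cast at hk ⊢
          rw [hD] at hk
          omega
        rw [← h', hmapeq, ← hchar1, hD]

-- B's relaxation loop computes the exact depths (running j rounds from a
-- stage-j-invariant dict, or stopping early at a fixpoint)
theorem pvRun_exact (revdeps : List (String × List String)) (nodes : List String)
    (hdep : ∀ n ∈ nodes, ∃ d, pvDepth revdeps (revdeps.length + 1) n = some d)
    (hcl : ∀ n ∈ nodes, ∀ p ∈ pvParents revdeps n, p ∈ nodes) :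
    ∀ (k : Nat) (c : PySem.Dict String Int) (j : Nat),
      (∀ n ∈ nodes, ∃ v, c.get? n = some v ∧
        v ≤ (pvDepth revdeps (revdeps.length + 1) n).getD 0 ∧
        ((pvDepth revdeps (revdeps.length + 1) n).getD 0 ≤ (j : Int) →
          v = (pvDepth revdeps (revdeps.length + 1) n).getD 0)) →
      (∀ n ∈ nodes, (pvDepth revdeps (revdeps.length + 1) n).getD 0 ≤ (j : Int) + (k : Int)) →
      ∀ n ∈ nodes, (pvRun revdeps nodes k c).getD n 0
        = (pvDepth revdeps (revdeps.length + 1) n).getD 0 := by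
  intro k
  induction k with
  | zero =>
    intro c j hinv hbound n hn
    obtain ⟨v, hv, _, hex⟩ := hinv n hn
    rw [pvRun, PySem.Dict.getD_eq_get?_getD, hv]
    have := hbound n hn
    simpa using hex (by push_cast at this ⊢; omega)
  | succ k ih =>
    intro c j hinv hbound
    obtain ⟨hA, hB⟩ := pvPassF_fold revdeps nodes hdep hcl j nodes c false
      (fun m hm => hm) hinv
    have hinv' : ∀ n ∈ nodes, ∃ v, (pvPassF revdeps nodes c).1.get? n = some v ∧
        v ≤ (pvDepth revdeps (revdeps.length + 1) n).getD 0 ∧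
        ((pvDepth revdeps (revdeps.length + 1) n).getD 0 ≤ (j : Int) + 1 →
          v = (pvDepth revdeps (revdeps.length + 1) n).getD 0) := by
      intro n hn
      obtain ⟨v, hv, hle, _⟩ := hA n hn
      obtain ⟨v', hv', hex⟩ := hB n hn
      rw [pvPassF]
      rw [hv] at hv'
      have hvv : v = v' := by simpa using hv'
      exact ⟨v, hv, hle, fun h' => hvv ▸ hex h'⟩
    intro n hn
    rw [pvRun]
    by_cases hch : (pvPassF revdeps nodes c).2 = true
    · simp only [hch, if_true]
      refine ih (pvPassF revdeps nodes c).1 (j + 1) ?_ ?_ n hn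
      · intro m hm
        obtain ⟨v, hv, hle, hex⟩ := hinv' m hm
        exact ⟨v, hv, hle, fun h' => hex (by push_cast at h' ⊢; omega)⟩
      · intro m hm
        have := hbound m hm
        push_cast at this ⊢
        omega
    · simp only [hch]
      rw [Bool.not_eq_true] at hch
      have hfalse := pvPassF_false revdeps nodes (c, false) hch
      obtain ⟨_, hfst, hprops⟩ := hfalse
      have hfst' : (pvPassF revdeps nodes c).1 = c := hfst
      rw [hfst']
      refine pvFix_exact revdeps nodes hdep hcl c ?_ ?_ n hn
      · intro m hm
        obtain ⟨v, hv, hle, hex⟩ := hinv m hm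
        refine ⟨v, hv, hle, fun h' => hex ?_⟩
        have : (0 : Int) ≤ (j : Int) := Int.natCast_nonneg j
        omega
      · exact hprops

-- ===== sorted-list lemmas =====

theorem pvInsertBy_congr {α : Type} (b1 b2 : α → α → Bool) (S : List α)
    (h : ∀ x ∈ S, ∀ y ∈ S, b1 x y = b2 x y) (x : α) (hx : x ∈ S) :
    ∀ (acc : List α), (∀ y ∈ acc, y ∈ S) →
      PySem.List.insertBy b1 x acc = PySem.List.insertBy b2 x acc := by
  intro acc
  induction acc with
  | nil => intro _; rfl
  | cons y ys ih =>
    intro hacc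
    have hy : y ∈ S := hacc y List.mem_cons_self
    rw [PySem.List.insertBy, PySem.List.insertBy, h x hx y hy]
    by_cases hb : b2 x y = true
    · rw [if_pos hb, if_pos hb]
    · rw [if_neg hb, if_neg hb, ih (fun z hz => hacc z (List.mem_cons_of_mem _ hz))]

theorem pvFoldl_insertBy_congr {α : Type} (b1 b2 : α → α → Bool) (S : List α)
    (h : ∀ x ∈ S, ∀ y ∈ S, b1 x y = b2 x y) :
    ∀ (l : List α), (∀ x ∈ l, x ∈ S) → ∀ (acc : List α), (∀ y ∈ acc, y ∈ S) →
      l.foldl (fun acc x => PySem.List.insertBy b1 x acc) acc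
        = l.foldl (fun acc x => PySem.List.insertBy b2 x acc) acc := by
  intro l
  induction l with
  | nil => intro _ acc _; rfl
  | cons x xs ih =>
    intro hl acc hacc
    have hx : x ∈ S := hl x List.mem_cons_self
    rw [List.foldl_cons, List.foldl_cons, pvInsertBy_congr b1 b2 S h x hx acc hacc]
    refine ih (fun z hz => hl z (List.mem_cons_of_mem _ hz)) _ ?_
    intro y hy
    rw [PySem.List.insertBy_mem_iff] at hy
    rcases hy with rfl | hy
    · exact hx
    · exact hacc y hy

-- sorted with keys agreeing on the list's members
theorem pvSorted_congr {α κ : Type} [LinearOrder κ] (xs : List α) (key key' : α → κ)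
    (h : ∀ x ∈ xs, key x = key' x) :
    PySem.List.sorted xs key = PySem.List.sorted xs key' := by
  show xs.foldl (fun acc x => PySem.List.insertBy (fun a b => decide (key a < key b)) x acc) []
    = xs.foldl (fun acc x => PySem.List.insertBy (fun a b => decide (key' a < key' b)) x acc) []
  refine pvFoldl_insertBy_congr _ _ xs ?_ xs (fun x hx => hx) [] (by simp)
  intro x hx y hy
  rw [h x hx, h y hy]

-- sorted2 (Python's two-component tuple key) is sorted with the lexicographic key
theorem pvSorted2_eq_sorted_lex {α κ₁ κ₂ : Type} [LinearOrder κ₁] [LinearOrder κ₂]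
    (xs : List α) (k1 : α → κ₁) (k2 : α → κ₂) :
    PySem.List.sorted2 xs k1 k2 = PySem.List.sorted xs (fun x => toLex (k1 x, k2 x)) := by
  show xs.foldl (fun acc x => PySem.List.insertBy
      (fun a b => decide (k1 a < k1 b) || (!decide (k1 b < k1 a) && decide (k2 a < k2 b))) x acc) []
    = xs.foldl (fun acc x => PySem.List.insertBy
      (fun a b => decide (toLex (k1 a, k2 a) < toLex (k1 b, k2 b))) x acc) []
  have hb : (fun (a b : α) => decide (k1 a < k1 b) || (!decide (k1 b < k1 a) && decide (k2 a < k2 b)))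
      = (fun (a b : α) => decide (toLex (k1 a, k2 a) < toLex (k1 b, k2 b))) := by
    funext a b
    have hiff : (toLex (k1 a, k2 a) < toLex (k1 b, k2 b)) ↔
        (k1 a < k1 b ∨ (k1 a = k1 b ∧ k2 a < k2 b)) := Prod.Lex.lt_iff
    rw [decide_eq_decide.mpr hiff]
    rcases lt_trichotomy (k1 a) (k1 b) with h | h | h
    · simp [h]
    · simp [h]
    · simp [h, not_lt_of_gt h, ne_of_gt h]
    · exact inferInstance
  rw [hb]

theorem pvParents_flat (revdeps : List (String × List String)) (n : String) :
    ∀ p ∈ pvParents revdeps n, p ∈ revdeps.flatMap (fun e => e.2) := by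
  induction revdeps with
  | nil =>
    intro p hp
    rw [pvParents, PySem.Dict.getD_eq_get?_getD,
      show (PySem.Dict.mk ([] : List (String × List String))).get? n = none from rfl] at hp
    simp at hp
  | cons e rest ih =>
    intro p hp
    rw [pvParents, PySem.Dict.getD_eq_get?_getD, PySem.Dict.get?_mk_cons] at hp
    by_cases he : e.1 == n
    · rw [if_pos he] at hp
      simp only [Option.getD_some] at hp
      exact List.mem_flatMap.mpr ⟨e, List.mem_cons_self, hp⟩
    · rw [if_neg he] at hp
      rw [List.flatMap_cons]
      refine List.mem_append_right _ (ih p ?_)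
      rw [pvParents, PySem.Dict.getD_eq_get?_getD]
      exact hp

-- the assembled equivalence
theorem pvMain : ∀ (targets : List String) (revdeps : List (String × List String)), Pre_resolve_with_parents targets revdeps → resolve_with_parents targets revdeps = resolve_with_parents_alt targets revdeps := by
  intro targets revdeps hpre
  unfold Pre_resolve_with_parents at hpre
  rw [resolve_with_parents, resolve_with_parents_alt]
  set F := revdeps.length + 1 with hF
  set univA := targets ++ revdeps.map (·.1) ++ revdeps.flatMap (·.2) with huA
  set seen := pvBfs revdeps univA PySem.Dict.empty targets with hseen
  set cacheA := seen.keys.foldl (fun c n => (pvVisit revdeps F c n).2) PySem.Dict.empty with hcacheA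
  set univB := targets ++ revdeps.flatMap (·.2) with huB
  set closure := pvExpand revdeps univB PySem.Set.empty (PySem.Set.ofList targets) with hclos
  set nodes := PySem.List.sorted closure (fun n => n) with hnodes
  -- A-side facts
  have hp_univA : ∀ m p, p ∈ pvParents revdeps m → p ∈ univA := by
    intro m p hp
    exact List.mem_append_right _ (pvParents_flat revdeps m p hp)
  have hqu : ∀ x ∈ targets, x ∈ univA := by
    intro x hx
    exact List.mem_append_left _ (List.mem_append_left _ hx)
  have hIff : ∀ k, seen.contains k = true ↔ pvR targets revdeps k := by
    intro k
    constructor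
    · intro h
      rcases pvBfs_sound revdeps univA PySem.Dict.empty targets k h with h | h
      · rw [PySem.Dict.contains_empty] at h; exact absurd h (by simp)
      · exact h
    · rintro ⟨t, ht, hr⟩
      have hct : seen.contains t = true := pvBfs_mem_q revdeps univA PySem.Dict.empty targets t ht
      have hcl := pvBfs_closed revdeps univA hp_univA PySem.Dict.empty targets hqu
        (by intro m hm; rw [PySem.Dict.contains_empty] at hm; exact absurd hm (by simp))
      exact pvClosed_reach (fun k hk p hp => hcl k hk p hp) hct hr
  have hnd : seen.keys.Nodup := pvBfs_nodup revdeps univA PySem.Dict.empty targets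
    (by rw [PySem.Dict.keys_empty]; exact List.nodup_nil)
  have hKAr : ∀ n ∈ seen.keys, pvR targets revdeps n := by
    intro n hn
    exact (hIff n).mp ((PySem.Dict.contains_iff_mem_keys seen n).mpr hn)
  obtain ⟨hInvA, hConA⟩ := pvFold_ok revdeps F seen.keys PySem.Dict.empty (pvInv_empty revdeps)
    (fun n hn => pvPre_depth_some hpre (hKAr n hn))
  rw [← hcacheA] at hInvA hConA
  have hAval : ∀ n ∈ seen.keys, cacheA.getD n 0 = (pvDepth revdeps F n).getD 0 := by
    intro n hn
    have hc : cacheA.contains n = true := by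
      rw [hConA n]
      exact Or.inr ⟨n, hn, Relation.ReflTransGen.refl⟩
    cases hg : cacheA.get? n with
    | none => rw [PySem.Dict.contains_eq_isSome_get?, hg] at hc; exact absurd hc (by simp)
    | some v =>
      obtain ⟨f, hf⟩ := hInvA.2.1 n v hg
      obtain ⟨d, hd⟩ := pvPre_depth_some hpre (hKAr n hn)
      rw [PySem.Dict.getD_eq_get?_getD, hg, hd]
      simpa using pvDepth_unique revdeps hf hd
  -- B-side facts
  have hp_univB : ∀ m p, p ∈ pvParents revdeps m → p ∈ univB := by
    intro m p hp
    exact List.mem_append_right _ (pvParents_flat revdeps m p hp)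
  obtain ⟨eN, eC, eF, eCl, eS⟩ := pvExpand_spec revdeps univB hp_univB
    PySem.Set.empty (PySem.Set.ofList targets)
    (by simp [PySem.Set.empty])
    (by
      intro x hx
      rw [PySem.Set.mem_ofList] at hx
      exact ⟨List.mem_append_left _ hx, by simp [PySem.Set.empty]⟩)
    (by intro n hn; simp [PySem.Set.empty] at hn)
  rw [← hclos] at eN eC eF eCl eS
  have hclosmem : ∀ k, k ∈ closure ↔ pvR targets revdeps k := by
    intro k
    constructor
    · intro hk
      rcases eS k hk with h' | ⟨x, hx, hr⟩
      · simp [PySem.Set.empty] at h'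
      · rw [PySem.Set.mem_ofList] at hx
        exact ⟨x, hx, hr⟩
    · rintro ⟨t, ht, hr⟩
      exact pvClosed_reach_mem eCl (eF t ((PySem.Set.mem_ofList _ _).mpr ht)) hr
  have hpermN : nodes.Perm closure := PySem.List.sorted_perm closure (fun n => n) false
  have hnodesmem : ∀ k, k ∈ nodes ↔ pvR targets revdeps k := by
    intro k
    rw [hpermN.mem_iff, hclosmem]
  have hnodesnd : nodes.Nodup := hpermN.nodup_iff.mpr eN
  have hdepN : ∀ n ∈ nodes, ∃ d, pvDepth revdeps F n = some d := by
    intro n hn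
    exact pvPre_depth_some hpre ((hnodesmem n).mp hn)
  have hclN : ∀ n ∈ nodes, ∀ p ∈ pvParents revdeps n, p ∈ nodes := by
    intro n hn p hp
    rw [hpermN.mem_iff] at hn ⊢
    exact eCl n hn p hp
  have hBval : ∀ n ∈ nodes,
      (pvRun revdeps nodes revdeps.length
          (nodes.foldl (fun d n => PySem.Dict.insert d n (0 : Int)) PySem.Dict.empty)).getD n 0
      = (pvDepth revdeps F n).getD 0 := by
    have hinv0 : ∀ m ∈ nodes, ∃ v,
        (nodes.foldl (fun d n => PySem.Dict.insert d n (0 : Int)) PySem.Dict.empty).get? m = some v ∧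
        v ≤ (pvDepth revdeps F m).getD 0 ∧
        ((pvDepth revdeps F m).getD 0 ≤ ((0 : Nat) : Int) →
          v = (pvDepth revdeps F m).getD 0) := by
      intro m hm
      obtain ⟨d, hd⟩ := hdepN m hm
      obtain ⟨hd0, _⟩ := pvDepth_bounds revdeps _ m d hd
      have hD : (pvDepth revdeps F m).getD 0 = d := by rw [hd]; rfl
      refine ⟨0, ?_, ?_, ?_⟩
      · rw [pvInit_get?, if_pos hm]
      · rw [hD]; exact hd0
      · intro h'
        rw [hD] at h' ⊢
        simp only [Nat.cast_zero] at h'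
        omega
    intro n hn
    refine pvRun_exact revdeps nodes hdepN hclN revdeps.length _ 0 hinv0 ?_ n hn
    intro m hm
    obtain ⟨d, hd⟩ := hdepN m hm
    obtain ⟨_, hdb⟩ := pvDepth_bounds revdeps _ m d hd
    rw [hd]
    simp only [Option.getD_some]
    rw [hF] at hdb
    push_cast at hdb ⊢
    omega
  -- the two key lists are permutations of each other
  have hperm : seen.keys.Perm nodes := by
    rw [List.perm_ext_iff_of_nodup hnd hnodesnd]
    intro a
    rw [hnodesmem a, ← PySem.Dict.contains_iff_mem_keys, hIff a]
  -- the common sort key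
  have hinj : Function.Injective (fun n => toLex ((pvDepth revdeps F n).getD 0, n)) := by
    intro a b h
    simpa using congrArg (fun z => (ofLex z).2) h
  have hsorted : PySem.List.sorted2 seen.keys (fun n => cacheA.getD n 0) (fun n => n)
      = PySem.List.sorted2 nodes
        (fun n => (pvRun revdeps nodes revdeps.length
          (nodes.foldl (fun d n => PySem.Dict.insert d n (0 : Int)) PySem.Dict.empty)).getD n 0)
        (fun n => n) := by
    rw [pvSorted2_eq_sorted_lex, pvSorted2_eq_sorted_lex]
    have e1 : PySem.List.sorted seen.keys (fun n => toLex (cacheA.getD n 0, n))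
        = PySem.List.sorted seen.keys (fun n => toLex ((pvDepth revdeps F n).getD 0, n)) := by
      refine pvSorted_congr _ _ _ ?_
      intro n hn
      rw [hAval n hn]
    have e2 : PySem.List.sorted nodes
          (fun n => toLex ((pvRun revdeps nodes revdeps.length
          (nodes.foldl (fun d n => PySem.Dict.insert d n (0 : Int)) PySem.Dict.empty)).getD n 0, n))
        = PySem.List.sorted nodes (fun n => toLex ((pvDepth revdeps F n).getD 0, n)) := by
      refine pvSorted_congr _ _ _ ?_
      intro n hn
      rw [hBval n hn]
    rw [e1, e2]
    exact PySem.List.sorted_eq_sorted_of_perm _ _ _ hinj hperm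
  rw [hsorted]

-- ===== VERDICT (by name: the statement is the Claim_ definition above) =====
theorem resolve_with_parents_spec : Claim_equal_resolve_with_parents := by
  intro targets revdeps _ hpre
  exact pvMain targets revdeps hpre
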